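-- pv_equiv track=rewrite | github.com/yuhuang-cst/meddict | code/gradedMT/tool.py | bagOfWordsEqualList
-- ===== SOURCE A (Python) =====
-- def bagOfWordsEqualList(wordList1, wordList2):
-- 	def genBagOfWords(wordList):
-- 		wordDict = {}
-- 		for word in wordList:
-- 			if word in wordDict:
-- 				wordDict[word] += 1
-- 			else:
-- 				wordDict[word] = 1
-- 		return wordDict
-- 	return genBagOfWords(wordList1) == genBagOfWords(wordList2)
-- ===== SOURCE B (Python) =====
-- def bagOfWordsEqualList(wordList1, wordList2):
-- 	count = {}
-- 	for word in wordList1: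
-- 		count[word] = count.get(word, 0) + 1
-- 	for word in wordList2:
-- 		count[word] = count.get(word, 0) - 1
-- 	return all(v == 0 for v in count.values())
-- ===== Notes on version B (the rewrite author's own statement) =====
-- stated objective: alternative
-- what changed: B keeps a single net-difference counter (add 1 per word of list 1, subtract 1 per word of list 2) and checks all values are zero, instead of building two separate frequency dicts and comparing them for equality.
import Mathlib
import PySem

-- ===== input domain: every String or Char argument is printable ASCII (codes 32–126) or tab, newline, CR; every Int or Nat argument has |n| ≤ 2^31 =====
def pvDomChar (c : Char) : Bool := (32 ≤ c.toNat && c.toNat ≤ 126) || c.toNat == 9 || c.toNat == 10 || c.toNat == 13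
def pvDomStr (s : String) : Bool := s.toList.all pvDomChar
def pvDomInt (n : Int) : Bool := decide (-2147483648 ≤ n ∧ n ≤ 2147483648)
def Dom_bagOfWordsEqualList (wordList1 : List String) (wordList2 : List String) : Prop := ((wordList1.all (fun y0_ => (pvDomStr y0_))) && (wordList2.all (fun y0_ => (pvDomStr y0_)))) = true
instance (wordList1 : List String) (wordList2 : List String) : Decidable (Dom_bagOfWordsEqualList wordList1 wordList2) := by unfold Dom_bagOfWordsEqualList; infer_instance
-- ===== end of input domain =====

-- B replaces A's two frequency dicts compared with `==` by one net-difference counter checked for all-zero values (alternative decomposition, same O(n) cost).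

-- ===== PORT A =====
def pvGenBagOfWords (wordList : List String) : PySem.Dict String Int :=
  wordList.foldl
    (fun wordDict word =>
      if wordDict.contains word then wordDict.insert word (wordDict.getD word 0 + 1)
      else wordDict.insert word 1)
    PySem.Dict.empty

-- Python's dict `==` ignores insertion order: compare lookups over both key lists (exact for dicts with unique keys).
def pvDictEqPy (d1 d2 : PySem.Dict String Int) : Bool :=
  d1.keys.all (fun k => d2.get? k == d1.get? k) && d2.keys.all (fun k => d1.get? k == d2.get? k)

def bagOfWordsEqualList (wordList1 : List String) (wordList2 : List String) : Bool :=
  pvDictEqPy (pvGenBagOfWords wordList1) (pvGenBagOfWords wordList2)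

-- ===== PORT B =====
def bagOfWordsEqualList_alt (wordList1 : List String) (wordList2 : List String) : Bool :=
  let count1 := wordList1.foldl (fun count word => count.modify word 0 (· + 1))
    (PySem.Dict.empty : PySem.Dict String Int)
  let count2 := wordList2.foldl (fun count word => count.modify word 0 (· - 1)) count1
  count2.values.all (fun v => v == 0)

-- ===== PRECONDITION & SPEC =====
def Spec_bagOfWordsEqualList (wordList1 : List String) (wordList2 : List String) (out : Bool) : Prop := out = bagOfWordsEqualList_alt wordList1 wordList2
instance (wordList1 : List String) (wordList2 : List String) (out : Bool) : Decidable (Spec_bagOfWordsEqualList wordList1 wordList2 out) := by unfold Spec_bagOfWordsEqualList; infer_instance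

-- ===== CLAIM (what is proved, stated in full; the proofs are below) =====
def Claim_equal_bagOfWordsEqualList : Prop := ∀ (wordList1 : List String) (wordList2 : List String), Dom_bagOfWordsEqualList wordList1 wordList2 → Spec_bagOfWordsEqualList wordList1 wordList2 (bagOfWordsEqualList wordList1 wordList2)

-- ===== LEMMAS AND PROOFS =====

theorem pvGenBag_eq_counter (l : List String) :
    pvGenBagOfWords l = PySem.Dict.counter l := by
  have h : ∀ (l : List String) (d : PySem.Dict String Int),
      l.foldl (fun wordDict word =>
        if wordDict.contains word then wordDict.insert word (wordDict.getD word 0 + 1)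
        else wordDict.insert word 1) d
      = l.foldl (fun d w => d.insert w (d.getD w 0 + 1)) d := by
    intro l
    induction l with
    | nil => intro d; rfl
    | cons x xs ih =>
      intro d
      simp only [List.foldl_cons]
      by_cases hc : d.contains x
      · rw [if_pos hc]; exact ih _
      · rw [if_neg hc]
        have h0 : d.getD x 0 = 0 := by
          simp only [PySem.Dict.getD,
            (PySem.Dict.get?_eq_none_iff_contains d x).mpr (by simpa using hc)]
          rfl
        have h1 : d.getD x 0 + 1 = (1 : Int) := by rw [h0]; ring
        rw [h1]
        exact ih _
  unfold pvGenBagOfWords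
  rw [h]
  exact PySem.Dict.foldl_insert_getD_add_one_eq_counter l

theorem pvGet?_counter (l : List String) (k : String) :
    (PySem.Dict.counter l).get? k = if k ∈ l then some ((List.count k l : Int)) else none := by
  by_cases h : k ∈ l
  · rw [if_pos h]
    have hc : (PySem.Dict.counter l).contains k = true := by
      rw [PySem.Dict.contains_counter]; simpa using h
    cases hv : (PySem.Dict.counter l).get? k with
    | none =>
      rw [(PySem.Dict.get?_eq_none_iff_contains _ _).mp hv] at hc
      simp at hc
    | some v =>
      have hgd : (PySem.Dict.counter l).getD k 0 = v := by
        simp [PySem.Dict.getD, hv]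
      rw [PySem.Dict.getD_counter] at hgd
      rw [hgd]
  · rw [if_neg h, PySem.Dict.get?_eq_none_iff_contains, PySem.Dict.contains_counter]
    simpa using h

theorem pvA_iff (l1 l2 : List String) :
    bagOfWordsEqualList l1 l2 = true ↔
      ∀ k : String, (k ∈ l1 ∨ k ∈ l2) → (List.count k l1 : Int) = List.count k l2 := by
  unfold bagOfWordsEqualList pvDictEqPy
  rw [pvGenBag_eq_counter, pvGenBag_eq_counter, PySem.Dict.keys_counter,
    PySem.Dict.keys_counter, Bool.and_eq_true, List.all_eq_true, List.all_eq_true]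
  constructor
  · rintro ⟨h1, h2⟩ k hk
    cases hk with
    | inl hk1 =>
      have h := h1 k ((PySem.Set.mem_ofList l1 k).mpr hk1)
      rw [beq_iff_eq, pvGet?_counter, pvGet?_counter, if_pos hk1] at h
      by_cases hk2 : k ∈ l2
      · rw [if_pos hk2] at h
        exact (Option.some.inj h).symm
      · rw [if_neg hk2] at h
        exact absurd h (by simp)
    | inr hk2 =>
      have h := h2 k ((PySem.Set.mem_ofList l2 k).mpr hk2)
      rw [beq_iff_eq, pvGet?_counter, pvGet?_counter, if_pos hk2] at h
      by_cases hk1 : k ∈ l1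
      · rw [if_pos hk1] at h
        exact Option.some.inj h
      · rw [if_neg hk1] at h
        exact absurd h (by simp)
  · intro h
    constructor
    · intro k hk
      have hk1 := (PySem.Set.mem_ofList l1 k).mp hk
      have hceq := h k (Or.inl hk1)
      have hpos : 0 < List.count k l1 := List.count_pos_iff.mpr hk1
      have hpos2 : 0 < List.count k l2 := by
        have : (0 : Int) < List.count k l2 := by rw [← hceq]; exact_mod_cast hpos
        exact_mod_cast this
      have hk2 : k ∈ l2 := List.count_pos_iff.mp hpos2
      rw [beq_iff_eq, pvGet?_counter, pvGet?_counter, if_pos hk1, if_pos hk2]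
      exact congrArg some hceq.symm
    · intro k hk
      have hk2 := (PySem.Set.mem_ofList l2 k).mp hk
      have hceq := h k (Or.inr hk2)
      have hpos : 0 < List.count k l2 := List.count_pos_iff.mpr hk2
      have hpos1 : 0 < List.count k l1 := by
        have : (0 : Int) < List.count k l1 := by rw [hceq]; exact_mod_cast hpos
        exact_mod_cast this
      have hk1 : k ∈ l1 := List.count_pos_iff.mp hpos1
      rw [beq_iff_eq, pvGet?_counter, pvGet?_counter, if_pos hk1, if_pos hk2]
      exact congrArg some hceq

theorem pvGetD_foldl_sub (l : List String) (d : PySem.Dict String Int) (v : String) :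
    (l.foldl (fun count word => count.modify word 0 (· - 1)) d).getD v 0
      = d.getD v 0 - List.count v l := by
  induction l generalizing d with
  | nil => simp
  | cons x xs ih =>
    simp only [List.foldl_cons]
    rw [ih, PySem.Dict.getD_modify]
    by_cases hv : v = x
    · subst hv
      simp
      omega
    · rw [if_neg hv]
      have hx : (x == v) = false := by simpa using fun h => hv h.symm
      simp [List.count_cons, hx]

theorem pvB_iff (l1 l2 : List String) :
    bagOfWordsEqualList_alt l1 l2 = true ↔
      ∀ k : String, (k ∈ l1 ∨ k ∈ l2) → (List.count k l1 : Int) = List.count k l2 := by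
  simp only [bagOfWordsEqualList_alt]
  have hc1 : List.foldl (fun (count : PySem.Dict String Int) word => count.modify word 0 (· + 1))
      PySem.Dict.empty l1 = PySem.Dict.counter l1 := (PySem.Dict.counter_eq_foldl l1).symm
  simp only [hc1]
  have hnd : (l2.foldl (fun count word => count.modify word 0 (· - 1))
      (PySem.Dict.counter l1)).keys.Nodup :=
    PySem.Dict.nodup_keys_foldl_modify_key l2 id 0 (fun _ _ v => v - 1) _
      (PySem.Dict.nodup_keys_counter l1)
  rw [PySem.Dict.values_eq_map_keys _ hnd 0, List.all_map, List.all_eq_true]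
  have hkeys : (l2.foldl (fun count word => count.modify word 0 (· - 1))
      (PySem.Dict.counter l1)).keys = PySem.Set.update (PySem.Set.ofList l1) l2 := by
    rw [PySem.Dict.keys_foldl_modify l2 0 (fun _ _ v => v - 1), PySem.Dict.keys_counter]
  constructor
  · intro h k hk
    have hmem : k ∈ (l2.foldl (fun count word => count.modify word 0 (· - 1))
        (PySem.Dict.counter l1)).keys := by
      rw [hkeys, PySem.Set.mem_update, PySem.Set.mem_ofList]
      exact hk
    have := h k hmem
    simp only [Function.comp] at this
    rw [beq_iff_eq, pvGetD_foldl_sub, PySem.Dict.getD_counter] at this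
    omega
  · intro h k hk
    simp only [Function.comp]
    rw [beq_iff_eq, pvGetD_foldl_sub, PySem.Dict.getD_counter]
    rw [hkeys, PySem.Set.mem_update, PySem.Set.mem_ofList] at hk
    have := h k hk
    omega

-- ===== VERDICT (by name: the statement is the Claim_ definition above) =====
theorem bagOfWordsEqualList_spec : Claim_equal_bagOfWordsEqualList := by
  intro l1 l2 _
  unfold Spec_bagOfWordsEqualList
  have h := (pvA_iff l1 l2).trans (pvB_iff l1 l2).symm
  cases hA : bagOfWordsEqualList l1 l2 <;> cases hB : bagOfWordsEqualList_alt l1 l2 <;>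
    simp_all
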